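-- pv_equiv track=rewrite | github.com/Victor-Smirnoff/my_codesignal_solutions_Python | Intro/matrixElementsSum.py | solution
-- ===== SOURCE A (Python) =====
-- def solution(matrix):
--     for i in range(len(matrix)):
--         for j in range(len(matrix[i])):
--             if matrix[i][j] == 0:
--                 for k in range(i, len(matrix)):
--                     matrix[k][j] = 0
--     res = 0
--     for i in range(len(matrix)):
--         res += sum(matrix[i])
--     return res
-- ===== SOURCE B (Python) =====
-- def solution(matrix):
--     dead = set()
--     res = 0
--     for row in matrix:
--         for j, v in enumerate(row):
--             if j in dead:
--                 continue
--             if v == 0: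
--                 dead.add(j)
--             else:
--                 res += v
--     return res
-- ===== Notes on version B (the rewrite author's own statement) =====
-- stated objective: faster
-- what changed: A repeatedly zeroes whole column suffixes of the (mutated) matrix whenever it meets a zero and then sums everything; B makes a single pass over the rows, keeping a set of dead columns and summing live entries as it goes.
import Mathlib
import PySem

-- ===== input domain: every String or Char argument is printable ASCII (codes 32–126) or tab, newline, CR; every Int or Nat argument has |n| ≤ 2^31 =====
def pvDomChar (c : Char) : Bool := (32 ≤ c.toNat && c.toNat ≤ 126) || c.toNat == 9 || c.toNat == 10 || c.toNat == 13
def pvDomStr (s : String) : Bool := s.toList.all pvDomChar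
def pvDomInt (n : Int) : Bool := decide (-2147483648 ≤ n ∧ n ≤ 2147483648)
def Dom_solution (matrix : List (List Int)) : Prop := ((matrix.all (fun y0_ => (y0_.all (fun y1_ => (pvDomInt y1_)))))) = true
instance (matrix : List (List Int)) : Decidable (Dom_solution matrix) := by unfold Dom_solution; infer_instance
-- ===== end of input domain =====

-- B replaces A's cascade of in-place column-zeroing passes (A mutates its argument; equality proved is about
-- the RETURN value only, B does not mutate) by one pass that sums entries while tracking dead columns in a set.

-- ===== PORT A =====
-- 'for k in range(i, len(matrix)): matrix[k][j] = 0'   (fuel = number of remaining rows, makes the loop total)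
def zeroColFrom (fuel : Nat) (m : List (List Int)) (j k : Nat) : List (List Int) :=
  match fuel with
  | 0 => m
  | f + 1 =>
      if k < m.length then zeroColFrom f (m.set k ((m.getD k []).set j 0)) j (k + 1)
      else m

-- inner loop 'for j in range(len(matrix[i])): if matrix[i][j] == 0: …'  (fuel = remaining columns)
def innerLoop (fuel : Nat) (m : List (List Int)) (i : Nat) (j : Nat) : List (List Int) :=
  match fuel with
  | 0 => m
  | f + 1 =>
      if j < (m.getD i []).length then
        if (m.getD i []).getD j 0 = 0 then innerLoop f (zeroColFrom (m.length - i) m j i) i (j + 1)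
        else innerLoop f m i (j + 1)
      else m

-- outer loop 'for i in range(len(matrix)): …'  (fuel = remaining rows)
def outerLoop (fuel : Nat) (m : List (List Int)) (i : Nat) : List (List Int) :=
  match fuel with
  | 0 => m
  | f + 1 =>
      if i < m.length then outerLoop f (innerLoop (m.getD i []).length m i 0) (i + 1)
      else m

-- 'res = 0; for i in range(len(matrix)): res += sum(matrix[i])'
def sumRows (m : List (List Int)) : Int :=
  (List.range m.length).foldl (fun r i => r + (m.getD i []).sum) 0

def solution (matrix : List (List Int)) : Int :=
  sumRows (outerLoop matrix.length matrix 0)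

-- ===== PORT B =====
-- 'for j, v in enumerate(row): skip dead columns, a zero kills its column, else accumulate'
def rowScan (dead : PySem.Set Nat) (res : Int) (j : Nat) (row : List Int) :
    PySem.Set Nat × Int :=
  match row with
  | [] => (dead, res)
  | v :: rest =>
      if PySem.Set.contains dead j then rowScan dead res (j + 1) rest
      else if v = 0 then rowScan (PySem.Set.add dead j) res (j + 1) rest
      else rowScan dead (res + v) (j + 1) rest

def altGo (rows : List (List Int)) (dead : PySem.Set Nat) (res : Int) : Int :=
  match rows with
  | [] => res
  | row :: rest =>
      let st := rowScan dead res 0 row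
      altGo rest st.1 st.2

def solution_alt (matrix : List (List Int)) : Int :=
  altGo matrix PySem.Set.empty 0

-- ===== PRECONDITION & SPEC =====
-- Pre_ excludes exactly the inputs on which A raises IndexError: a zero at (i, j) whose column j is
-- missing (row too short) in some row k ≥ i makes A execute 'matrix[k][j] = 0' out of range.
def Pre_solution (matrix : List (List Int)) : Prop :=
  ∀ i ∈ List.range matrix.length, ∀ j ∈ List.range (matrix.getD i []).length,
    (matrix.getD i []).getD j 0 = 0 →
    ∀ k ∈ List.range matrix.length, i ≤ k → j < (matrix.getD k []).length
instance (matrix : List (List Int)) : Decidable (Pre_solution matrix) := by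
  unfold Pre_solution; infer_instance

def pvWitness_solution : List (List Int) := [[1, 0, 3], [4, 5, 6], [7, 8, 9]]

def Spec_solution (matrix : List (List Int)) (out : Int) : Prop := out = solution_alt matrix
instance (matrix : List (List Int)) (out : Int) : Decidable (Spec_solution matrix out) := by
  unfold Spec_solution; infer_instance

-- ===== CLAIM (what is proved, stated in full; the proofs are below) =====
def Claim_equal_solution : Prop :=
  ∀ (matrix : List (List Int)), Dom_solution matrix → Pre_solution matrix →
    Spec_solution matrix (solution matrix)

-- ===== LEMMAS AND PROOFS =====

theorem length_zeroColFrom (fuel : Nat) (m : List (List Int)) (j k : Nat) :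
    (zeroColFrom fuel m j k).length = m.length := by
  induction fuel generalizing m k with
  | zero => rfl
  | succ f ih =>
      simp only [zeroColFrom]
      split
      · rw [ih]; simp
      · rfl

theorem rowlen_zeroColFrom (fuel : Nat) (m : List (List Int)) (j k k' : Nat) :
    ((zeroColFrom fuel m j k).getD k' []).length = (m.getD k' []).length := by
  induction fuel generalizing m k with
  | zero => rfl
  | succ f ih =>
      simp only [zeroColFrom]
      split
      · rw [ih]
        by_cases hk : k' = k
        · subst hk
          rename_i h
          simp [List.getD_eq_getElem?_getD, List.getElem?_set_self h, List.getElem?_eq_getElem h]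
        · simp [List.getD_eq_getElem?_getD, List.getElem?_set_ne (by omega : k ≠ k')]
      · rfl

theorem length_innerLoop (fuel : Nat) (m : List (List Int)) (i j : Nat) :
    (innerLoop fuel m i j).length = m.length := by
  induction fuel generalizing m j with
  | zero => rfl
  | succ f ih =>
      simp only [innerLoop]
      split
      · split
        · rw [ih, length_zeroColFrom]
        · rw [ih]
      · rfl


-- entry (k, j) of a matrix, 0 outside
def ent (m : List (List Int)) (k j : Nat) : Int := (m.getD k []).getD j 0

theorem getD_set_zero (row : List Int) (j j' : Nat) :
    ((row.set j 0).getD j' 0) = if j' = j then 0 else row.getD j' 0 := by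
  by_cases h : j' = j
  · subst h
    by_cases hl : j' < row.length
    · simp [List.getD_eq_getElem?_getD, List.getElem?_set_self hl]
    · rw [if_pos rfl, List.set_eq_of_length_le (by omega), List.getD_eq_default _ _ (by omega)]
  · simp [h, List.getD_eq_getElem?_getD, List.getElem?_set_ne (by omega : j ≠ j')]

theorem ent_zeroColFrom (fuel : Nat) (m : List (List Int)) (j k k' j' : Nat)
    (hf : m.length ≤ k + fuel) :
    ent (zeroColFrom fuel m j k) k' j' =
      if j' = j ∧ k ≤ k' ∧ k' < m.length then 0 else ent m k' j' := by
  induction fuel generalizing m k with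
  | zero =>
      simp only [zeroColFrom]
      rw [if_neg (by rintro ⟨-, h1, h2⟩; omega)]
  | succ f ih =>
      simp only [zeroColFrom]
      split
      case isTrue h =>
        rw [ih _ _ (by simp; omega)]
        have hlen : (m.set k ((m.getD k []).set j 0)).length = m.length := by simp
        have hrow : (m.set k ((m.getD k []).set j 0)).getD k' [] =
            if k' = k then (m.getD k []).set j 0 else m.getD k' [] := by
          by_cases hk : k' = k
          · subst hk; simp [List.getD_eq_getElem?_getD, List.getElem?_set_self h]
          · simp [hk, List.getD_eq_getElem?_getD, List.getElem?_set_ne (by omega : k ≠ k')]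
        unfold ent
        rw [hlen, hrow]
        by_cases hk : k' = k
        · subst hk
          rw [if_pos rfl, getD_set_zero]
          split_ifs with h1 h2 h3 <;> simp_all
        · rw [if_neg hk]
          split_ifs with h1 h2 <;> simp_all <;> omega
      case isFalse h =>
        rw [if_neg (by omega)]

theorem rget_zeroColFrom_lt (fuel : Nat) (m : List (List Int)) (j k k' : Nat) (hk : k' < k) :
    (zeroColFrom fuel m j k).getD k' [] = m.getD k' [] := by
  induction fuel generalizing m k with
  | zero => rfl
  | succ f ih =>
      simp only [zeroColFrom]
      split
      · rw [ih _ _ (by omega)]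
        simp [List.getD_eq_getElem?_getD, List.getElem?_set_ne (by omega : k ≠ k')]
      · rfl

theorem rowlen_innerLoop (fuel : Nat) (m : List (List Int)) (i j k' : Nat) :
    ((innerLoop fuel m i j).getD k' []).length = (m.getD k' []).length := by
  induction fuel generalizing m j with
  | zero => rfl
  | succ f ih =>
      simp only [innerLoop]
      split
      · split
        · rw [ih, rowlen_zeroColFrom]
        · rw [ih]
      · rfl

theorem rget_innerLoop_lt (fuel : Nat) (m : List (List Int)) (i j k' : Nat) (hk : k' < i) :
    (innerLoop fuel m i j).getD k' [] = m.getD k' [] := by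
  induction fuel generalizing m j with
  | zero => rfl
  | succ f ih =>
      simp only [innerLoop]
      split
      · split
        · rw [ih]; exact rget_zeroColFrom_lt _ m j i k' hk
        · rw [ih]
      · rfl

theorem ent_innerLoop (fuel : Nat) (m : List (List Int)) (i j0 k j : Nat) (hk : i ≤ k)
    (hf : (m.getD i []).length ≤ j0 + fuel) :
    ent (innerLoop fuel m i j0) k j =
      if j0 ≤ j ∧ j < (m.getD i []).length ∧ ent m i j = 0 then 0 else ent m k j := by
  induction fuel generalizing m j0 with
  | zero =>
      simp only [innerLoop]
      rw [if_neg (by rintro ⟨h1, h2, -⟩; omega)]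
  | succ f ih =>
      simp only [innerLoop]
      split
      case isTrue h =>
        split
        case isTrue hz =>
          have hi : i < m.length := by
            by_contra hi
            have : m.getD i [] = [] := by
              simp [List.getD_eq_getElem?_getD, List.getElem?_eq_none_iff.mpr (by simpa using hi)]
            rw [this] at h; simp at h
          have hf0 : m.length ≤ i + (m.length - i) := by omega
          rw [ih _ _ (by rw [rowlen_zeroColFrom]; omega)]
          have hrl : ((zeroColFrom (m.length - i) m j0 i).getD i []).length
              = (m.getD i []).length := rowlen_zeroColFrom _ m j0 i i
          have hentI : ∀ j', ent (zeroColFrom (m.length - i) m j0 i) i j' = ent m i j' := by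
            intro j'
            rw [ent_zeroColFrom _ _ _ _ _ _ hf0]
            split_ifs with h1
            · obtain ⟨rfl, _, _⟩ := h1; exact hz.symm
            · rfl
          have hentK : ∀ j', ent (zeroColFrom (m.length - i) m j0 i) k j' =
              if j' = j0 ∧ k < m.length then 0 else ent m k j' := by
            intro j'
            rw [ent_zeroColFrom _ _ _ _ _ _ hf0]
            split_ifs with h1 h2 <;> simp_all
          rw [hrl, hentI, hentK]
          have hmk0 : k < m.length ∨ ent m k j = 0 := by
            by_cases hkl : k < m.length
            · exact Or.inl hkl
            · refine Or.inr ?_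
              have h1 : m[k]? = none := by
                rw [List.getElem?_eq_none_iff]; omega
              simp [ent, List.getD_eq_getElem?_getD, h1]
          by_cases hj : j = j0
          have hz' : ent m i j0 = 0 := hz
          · subst hj
            rw [if_neg (by rintro ⟨h1, -, -⟩; omega)]
            rcases hmk0 with h2 | h2 <;> split_ifs with ha hb <;> simp_all
          · split_ifs with h1 h2 h2 <;> simp_all <;> omega
        case isFalse hz =>
          rw [ih _ _ (by omega)]
          by_cases hj : j = j0
          · subst hj
            rw [if_neg (by rintro ⟨h1, -, -⟩; omega), if_neg (by intro hh; exact hz hh.2.2)]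
          · split_ifs with h1 h2 h2 <;> simp_all <;> omega
      case isFalse h =>
        rw [if_neg (by intro hh; omega)]

-- B-side characterisations
theorem rowScan_fst_res (dead : PySem.Set Nat) (res : Int) (j0 : Nat) (row : List Int) :
    (rowScan dead res j0 row).1 = (rowScan dead 0 j0 row).1 := by
  induction row generalizing dead res j0 with
  | nil => rfl
  | cons v rest ih =>
      unfold rowScan
      split_ifs <;> simp [ih]

theorem mem_rowScan_fst (row : List Int) (dead : PySem.Set Nat) (res : Int) (j0 x : Nat) :
    x ∈ (rowScan dead res j0 row).1 ↔
      x ∈ dead ∨ (j0 ≤ x ∧ x - j0 < row.length ∧ row.getD (x - j0) 0 = 0) := by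
  induction row generalizing dead res j0 with
  | nil => simp [rowScan]
  | cons v rest ih =>
      have hshift : x ≠ j0 →
          ((j0 ≤ x ∧ x - j0 < (v :: rest).length ∧ (v :: rest).getD (x - j0) 0 = 0) ↔
           (j0 + 1 ≤ x ∧ x - (j0 + 1) < rest.length ∧ rest.getD (x - (j0 + 1)) 0 = 0)) := by
        intro hx
        constructor
        · rintro ⟨h1, h2, h3⟩
          have he : x - j0 = (x - (j0 + 1)) + 1 := by omega
          rw [he, List.getD_cons_succ] at h3
          rw [List.length_cons, he] at h2
          exact ⟨by omega, by omega, h3⟩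
        · rintro ⟨h1, h2, h3⟩
          have he : x - j0 = (x - (j0 + 1)) + 1 := by omega
          refine ⟨by omega, ?_, ?_⟩
          · rw [List.length_cons, he]; omega
          · rw [he, List.getD_cons_succ]; exact h3
      simp only [rowScan]
      split_ifs with hd hv
      · have hdm : j0 ∈ dead := (PySem.Set.contains_iff _ _).mp hd
        rw [ih]
        by_cases hx : x = j0
        · subst hx; simp [hdm]
        · rw [hshift hx]
      · rw [ih]
        by_cases hx : x = j0
        · subst hx
          constructor
          · intro _
            refine Or.inr ⟨le_refl _, by simp, ?_⟩
            simpa [Nat.sub_self] using hv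
          · intro _
            exact Or.inl ((PySem.Set.mem_add _ _ _).mpr (Or.inr rfl))
        · rw [hshift hx]
          simp [PySem.Set.mem_add, hx]
      · have hdm : j0 ∉ dead := fun hm => hd ((PySem.Set.contains_iff _ _).mpr hm)
        rw [ih]
        by_cases hx : x = j0
        · subst hx
          constructor
          · rintro (h | h)
            · exact absurd h hdm
            · exact absurd h.1 (by omega)
          · rintro (h | h)
            · exact absurd h hdm
            · exact absurd (by simpa [Nat.sub_self] using h.2.2) hv
        · rw [hshift hx]

theorem rowScan_snd (row : List Int) (dead : PySem.Set Nat) (res : Int) (j0 : Nat)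
    (hd : dead.Nodup) :
    (rowScan dead res j0 row).2 =
      res + ((List.range row.length).map
        (fun off => if (j0 + off) ∈ dead then 0 else row.getD off 0)).sum := by
  induction row generalizing dead res j0 with
  | nil => simp [rowScan]
  | cons v rest ih =>
      have hmap : List.map ((fun off => if j0 + off ∈ dead then 0 else (v :: rest).getD off 0)
            ∘ Nat.succ) (List.range rest.length)
          = List.map (fun off => if j0 + 1 + off ∈ dead then 0 else rest.getD off 0)
            (List.range rest.length) := by
        apply List.map_congr_left
        intro off _
        have hadd : j0 + (off + 1) = j0 + 1 + off := by omega
        simp only [Function.comp_apply, List.getD_cons_succ, hadd]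
      have hmapadd : List.map (fun off => if j0 + 1 + off ∈ PySem.Set.add dead j0 then 0
            else rest.getD off 0) (List.range rest.length)
          = List.map (fun off => if j0 + 1 + off ∈ dead then 0 else rest.getD off 0)
            (List.range rest.length) := by
        apply List.map_congr_left
        intro off _
        have h2 : (j0 + 1 + off ∈ PySem.Set.add dead j0) ↔ (j0 + 1 + off ∈ dead) := by
          rw [PySem.Set.mem_add]
          constructor
          · rintro (hh | hh)
            · exact hh
            · omega
          · exact Or.inl
        split_ifs with ha hb hb
        · rfl
        · exact absurd (h2.mp ha) hb
        · exact absurd (h2.mpr hb) ha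
        · rfl
      simp only [rowScan, List.length_cons, List.range_succ_eq_map]
      split_ifs with hdc hv
      · have hdm : j0 ∈ dead := (PySem.Set.contains_iff _ _).mp hdc
        rw [ih dead res (j0 + 1) hd]
        simp only [List.map_cons, List.sum_cons, List.map_map]
        rw [hmap]
        simp [hdm]
      · have hdm : j0 ∉ dead := fun hmm => hdc ((PySem.Set.contains_iff _ _).mpr hmm)
        rw [ih (PySem.Set.add dead j0) res (j0 + 1) (PySem.Set.nodup_add _ _ hd)]
        simp only [List.map_cons, List.sum_cons, List.map_map]
        rw [hmap, hmapadd]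
        subst hv
        simp [hdm]
      · have hdm : j0 ∉ dead := fun hmm => hdc ((PySem.Set.contains_iff _ _).mpr hmm)
        rw [ih dead (res + v) (j0 + 1) hd]
        simp only [List.map_cons, List.sum_cons, List.map_map]
        rw [hmap]
        simp [hdm]
        ring

theorem rowScan_fst_nodup (row : List Int) (dead : PySem.Set Nat) (res : Int) (j0 : Nat)
    (hd : dead.Nodup) : (rowScan dead res j0 row).1.Nodup := by
  induction row generalizing dead res j0 with
  | nil => exact hd
  | cons v rest ih =>
      unfold rowScan
      split_ifs
      · exact ih dead res (j0 + 1) hd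
      · exact ih _ res (j0 + 1) (PySem.Set.nodup_add _ _ hd)
      · exact ih dead (res + v) (j0 + 1) hd

theorem altGo_res (rows : List (List Int)) (dead : PySem.Set Nat) (res : Int)
    (hd : dead.Nodup) : altGo rows dead res = res + altGo rows dead 0 := by
  induction rows generalizing dead res with
  | nil => simp [altGo]
  | cons row rest ih =>
      simp only [altGo]
      rw [ih _ _ (rowScan_fst_nodup row dead res 0 hd),
          ih _ _ (rowScan_fst_nodup row dead 0 0 hd),
          rowScan_fst_res dead res 0 row,
          rowScan_snd row dead res 0 hd, rowScan_snd row dead 0 0 hd]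
      ring

theorem map_range_getD {α : Type} (l : List α) (d : α) :
    (List.range l.length).map (fun j => l.getD j d) = l := by
  apply List.ext_getElem
  · simp
  · intro n h1 h2
    simp [List.getD_eq_getElem?_getD, List.getElem?_eq_getElem h2]

theorem sumRows_eq (m : List (List Int)) :
    sumRows m = ((List.range m.length).map (fun k => (m.getD k []).sum)).sum := by
  unfold sumRows
  rw [PySem.List.foldl_add]
  simp

theorem outerLoop_main (orig : List (List Int)) (t : Nat) :
    ∀ (i : Nat) (m : List (List Int)) (dead : PySem.Set Nat),
      dead.Nodup →
      m.length = orig.length →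
      orig.length ≤ i + t →
      i ≤ orig.length →
      (∀ k, (m.getD k []).length = (orig.getD k []).length) →
      (∀ k, i ≤ k → ∀ j, ent m k j = if j ∈ dead then 0 else ent orig k j) →
      sumRows (outerLoop t m i) =
        ((List.range i).map (fun k => (m.getD k []).sum)).sum + altGo (orig.drop i) dead 0 := by
  induction t with
  | zero =>
      intro i m dead hnd hm hle hi hrow h3
      have hieq : i = orig.length := by omega
      simp only [outerLoop]
      subst hieq
      rw [List.drop_eq_nil_iff.mpr (by omega)]
      simp [altGo, sumRows_eq, hm]
  | succ t ih =>
      intro i m dead hnd hm hle hi hrow h3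
      by_cases hlt : i < orig.length
      · -- step
        simp only [outerLoop]
        rw [if_pos (by omega)]
        set m'' := innerLoop (m.getD i []).length m i 0 with hm''
        have hlen'' : m''.length = orig.length := by rw [hm'', length_innerLoop, hm]
        have hrow'' : ∀ k, (m''.getD k []).length = (orig.getD k []).length := by
          intro k; rw [hm'', rowlen_innerLoop]; exact hrow k
        set rowi := orig.getD i [] with hri
        set st := rowScan dead 0 0 rowi with hst
        have hstd : st.1.Nodup := rowScan_fst_nodup rowi dead 0 0 hnd
        have hmemst : ∀ x, x ∈ st.1 ↔ x ∈ dead ∨ (x < rowi.length ∧ rowi.getD x 0 = 0) := by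
          intro x
          rw [hst, mem_rowScan_fst]
          simp
        have htrig : ∀ j, ent m i j = 0 ↔ (j ∈ dead ∨ ent orig i j = 0) := by
          intro j
          rw [h3 i (le_refl i) j]
          split_ifs with h
          · simp [h]
          · simp [h]
        have h3' : ∀ k, i + 1 ≤ k → ∀ j, ent m'' k j = if j ∈ st.1 then 0 else ent orig k j := by
          intro k hk j
          rw [hm'', ent_innerLoop _ m i 0 k j (by omega) (by omega), hrow i]
          have hent_orig : rowi.getD j 0 = ent orig i j := rfl
          by_cases hdj : j ∈ dead
          · rw [if_pos ((hmemst j).mpr (Or.inl hdj))]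
            by_cases hjr : j < rowi.length
            · rw [if_pos ⟨by omega, hjr, (htrig j).mpr (Or.inl hdj)⟩]
            · rw [if_neg (by intro hh; exact hjr hh.2.1), h3 k (by omega) j, if_pos hdj]
          · by_cases hz : j < rowi.length ∧ ent orig i j = 0
            · rw [if_pos ((hmemst j).mpr (Or.inr ⟨hz.1, hent_orig ▸ hz.2⟩)),
                if_pos ⟨by omega, hz.1, (htrig j).mpr (Or.inr hz.2)⟩]
            · rw [if_neg (by
                  intro hh
                  rcases (htrig j).mp hh.2.2 with h | h
                  · exact hdj h
                  · exact hz ⟨hh.2.1, h⟩)]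
              rw [if_neg (by
                  intro hh
                  rcases (hmemst j).mp hh with h | h
                  · exact hdj h
                  · exact hz ⟨h.1, hent_orig ▸ h.2⟩)]
              rw [h3 k (by omega) j, if_neg hdj]
        have hmain := ih (i + 1) m'' st.1 hstd hlen'' (by omega) (by omega) hrow'' h3'
        rw [hmain]
        -- rows below i unchanged
        have hfroz : ∀ k, k < i → m''.getD k [] = m.getD k [] := by
          intro k hk; rw [hm'']; exact rget_innerLoop_lt _ m i 0 k hk
        -- row i of m'' sums to st.2
        have hrowsum : (m''.getD i []).sum = st.2 := by
          have h1 : (m''.getD i []).sum =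
              ((List.range (m''.getD i []).length).map (fun j => (m''.getD i []).getD j 0)).sum := by
            rw [map_range_getD]
          rw [h1, hrow'' i]
          have h2 : ∀ j ∈ List.range rowi.length,
              (m''.getD i []).getD j 0 = if j ∈ dead then 0 else rowi.getD j 0 := by
            intro j hj
            rw [List.mem_range] at hj
            have : (m''.getD i []).getD j 0 = ent m'' i j := rfl
            rw [this, hm'', ent_innerLoop _ m i 0 i j (le_refl i) (by omega), hrow i]
            have hro : rowi.getD j 0 = ent orig i j := rfl
            by_cases hz : ent m i j = 0
            · rw [if_pos ⟨by omega, hj, hz⟩]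
              rcases (htrig j).mp hz with h | h
              · rw [if_pos h]
              · rw [hro, h]
                split_ifs <;> rfl
            · rw [if_neg (by intro hh; exact hz hh.2.2), h3 i (le_refl i) j]
              rw [hro]
          rw [List.map_congr_left h2, hst, rowScan_snd rowi dead 0 0 hnd]
          simp
        rw [List.range_succ, List.map_append, List.sum_append]
        have hdrop : orig.drop i = rowi :: orig.drop (i + 1) := by
          rw [List.drop_eq_getElem_cons hlt, hri, List.getD_eq_getElem?_getD,
            List.getElem?_eq_getElem hlt]
          rfl
        rw [hdrop]
        simp only [altGo]
        rw [← hst, altGo_res (List.drop (i + 1) orig) st.1 st.2 hstd]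
        have hfrozsum : (List.range i).map (fun k => (m''.getD k []).sum) =
            (List.range i).map (fun k => (m.getD k []).sum) := by
          apply List.map_congr_left
          intro k hk
          rw [List.mem_range] at hk
          rw [hfroz k hk]
        rw [hfrozsum]
        simp only [List.map_cons, List.map_nil, List.sum_cons, List.sum_nil, hrowsum]
        ring
      · -- i = orig.length
        have hieq : i = orig.length := by omega
        simp only [outerLoop]
        rw [if_neg (by omega)]
        subst hieq
        rw [List.drop_eq_nil_iff.mpr (by omega)]
        simp [altGo, sumRows_eq, hm]

theorem ports_agree (matrix : List (List Int)) : solution matrix = solution_alt matrix := by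
  unfold solution solution_alt
  have h := outerLoop_main matrix matrix.length 0 matrix PySem.Set.empty
    (by simp [PySem.Set.empty]) rfl (by omega) (by omega) (fun k => rfl)
    (by intro k _ j; simp [PySem.Set.empty])
  simpa [PySem.Set.empty] using h

-- ===== VERDICT (by name: the statement is the Claim_ definition above) =====
theorem solution_spec : Claim_equal_solution := by
  intro matrix _ _
  unfold Spec_solution
  exact ports_agree matrix
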